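-- pv_equiv track=rewrite | github.com/SandraSaju07/Data_Structures_and_Algorithms | Sliding_Window/Fixed_Size_Window/First_Negative_in_Every_Subarray_of_Size_k.py | firstNegativeInteger
-- ===== SOURCE A (Python) =====
-- def firstNegativeInteger(arr,k):
--     """
--     This method calculates the first negative number in every subarray of size 'k' using a sliding window approach.
--
--     :param arr: List of integers, the input array.
--     :param k: Integer, the size of the sliding window.
--     :return: List, the list of negative integers for each subarray of size 'k'.
--     """
--     i, j = 0, 0 # Initialize window pointers
--     lst, neg_lst = [], [] # Initialize current and total negative integer list
--
--     # Traverse through the array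
--     while j < len(arr):
--         # Add negative numbers to the list
--         if arr[j] < 0:
--             lst.append(arr[j])
--
--         # Once hit the required window size, append the values to the resultant list
--         if j-i+1 == k:
--             # If the list is empty, add zero to it
--             if len(lst) == 0:
--                 neg_lst.append(0)
--             else:
--                 neg_lst.append(lst[0])
--
--                 # If the first negative number is already taken from the list, pop it
--                 if arr[i] == lst[0]:
--                     lst.pop(0)
--             # Update left pointer to slide the window
--             i+=1
--
--         # Move right pointer to move the array
--         j+=1
--
--     return neg_lst
-- ===== SOURCE B (Python) =====
-- def firstNegativeInteger(arr, k):
--     # O(n): precompute positions of negatives once, then move one pointer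
--     # across them while sliding the window start.
--     n = len(arr)
--     if k < 1 or n < k:
--         return []
--     negs = [m for m in range(n) if arr[m] < 0]
--     res = []
--     p = 0
--     for s in range(n - k + 1):
--         while p < len(negs) and negs[p] < s:
--             p += 1
--         if p < len(negs) and negs[p] < s + k:
--             res.append(arr[negs[p]])
--         else:
--             res.append(0)
--     return res
-- ===== Notes on version B (the rewrite author's own statement) =====
-- stated objective: faster
-- what changed: Replaces A's per-window list of negative values (appended/popped while sliding) by a single precomputed list of negative positions scanned once with a monotone pointer, one window start at a time.
import Mathlib
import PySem

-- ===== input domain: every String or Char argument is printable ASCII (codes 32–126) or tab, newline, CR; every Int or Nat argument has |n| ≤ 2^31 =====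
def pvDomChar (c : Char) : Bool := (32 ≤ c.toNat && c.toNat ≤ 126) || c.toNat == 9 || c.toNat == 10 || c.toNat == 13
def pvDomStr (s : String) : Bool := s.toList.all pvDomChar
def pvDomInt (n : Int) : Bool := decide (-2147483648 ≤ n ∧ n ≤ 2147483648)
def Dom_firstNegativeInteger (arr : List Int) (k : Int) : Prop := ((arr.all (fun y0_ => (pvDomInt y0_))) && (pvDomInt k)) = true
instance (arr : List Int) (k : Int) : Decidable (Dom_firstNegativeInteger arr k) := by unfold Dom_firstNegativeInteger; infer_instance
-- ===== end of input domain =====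

-- B replaces A's per-window list bookkeeping by one precomputed list of negative
-- positions and a single forward pointer: alternative O(n)-time strategy.

-- ===== PORT A =====
-- literal port of A's while loop; arr[j] and arr[i] are read via getD, exact
-- because Python A only reads them at indices 0 ≤ i ≤ j < len(arr).
def firstNegativeIntegerGo (arr : List Int) (k : Int) (i j : Nat) (lst neg : List Int) : List Int :=
  if _h : j < arr.length then
    let a := arr.getD j 0
    let lst1 := if a < 0 then lst ++ [a] else lst
    if ((j : Int) - (i : Int) + 1 = k) then
      match lst1 with
      | [] => firstNegativeIntegerGo arr k (i+1) (j+1) lst1 (neg ++ [0])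
      | x :: rest =>
          firstNegativeIntegerGo arr k (i+1) (j+1)
            (if arr.getD i 0 = x then rest else x :: rest) (neg ++ [x])
    else firstNegativeIntegerGo arr k i (j+1) lst1 neg
  else neg
termination_by arr.length - j
decreasing_by all_goals omega

def firstNegativeInteger (arr : List Int) (k : Int) : List Int :=
  firstNegativeIntegerGo arr k 0 0 [] []

-- ===== PORT B =====
-- the inner `while p < len(negs) and negs[p] < s: p += 1`
def fniAdv (negs : List Nat) (s p : Nat) : Nat :=
  if _h : p < negs.length then
    if negs.getD p 0 < s then fniAdv negs s (p+1) else p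
  else p
termination_by negs.length - p
decreasing_by omega

-- the `for s in range(n-k+1)` loop, counting down the remaining windows
def fniGo (arr : List Int) (negs : List Nat) (kn : Nat) : Nat → Nat → Nat → List Int → List Int
  | 0, _, _, res => res
  | cnt+1, s, p, res =>
    let p' := fniAdv negs s p
    let v := if p' < negs.length ∧ negs.getD p' 0 < s + kn then arr.getD (negs.getD p' 0) 0 else 0
    fniGo arr negs kn cnt (s+1) p' (res ++ [v])

def firstNegativeInteger_alt (arr : List Int) (k : Int) : List Int :=
  if k < 1 ∨ (arr.length : Int) < k then []
  else
    let kn := k.toNat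
    let negs := (List.range arr.length).filter (fun m => decide (arr.getD m 0 < 0))
    fniGo arr negs kn (arr.length + 1 - kn) 0 0 []

-- ===== PRECONDITION & SPEC =====
def Spec_firstNegativeInteger (arr : List Int) (k : Int) (out : List Int) : Prop := out = firstNegativeInteger_alt arr k
instance (arr : List Int) (k : Int) (out : List Int) : Decidable (Spec_firstNegativeInteger arr k out) := by unfold Spec_firstNegativeInteger; infer_instance

-- ===== CLAIM (what is proved, stated in full; the proofs are below) =====
def Claim_equal_firstNegativeInteger : Prop := ∀ (arr : List Int) (k : Int), Dom_firstNegativeInteger arr k → Spec_firstNegativeInteger arr k (firstNegativeInteger arr k)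

-- ===== LEMMAS AND PROOFS =====

-- the common value of window s: head (or 0) of the negatives of arr[s:s+kn]
def fniWinval (arr : List Int) (kn s : Nat) : Int :=
  (((arr.drop s).take kn).filter (fun x => decide (x < 0))).headD 0

def fniNegs (arr : List Int) : List Nat :=
  (List.range arr.length).filter (fun m => decide (arr.getD m 0 < 0))

theorem fniNegs_mem (arr : List Int) (m : Nat) :
    m ∈ fniNegs arr ↔ m < arr.length ∧ arr.getD m 0 < 0 := by
  simp [fniNegs, List.mem_filter, List.mem_range]

theorem fniNegs_sorted (arr : List Int) : (fniNegs arr).Pairwise (· < ·) :=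
  (List.pairwise_lt_range).filter _

theorem fniNegs_getD_lt (arr : List Int) (q : Nat) (hq : q < (fniNegs arr).length) :
    (fniNegs arr).getD q 0 < arr.length := by
  have hm : (fniNegs arr).getD q 0 ∈ fniNegs arr := by
    rw [List.getD_eq_getElem _ _ hq]; exact List.getElem_mem hq
  exact ((fniNegs_mem arr _).1 hm).1

theorem fniNegs_mono (arr : List Int) (q r : Nat) (hqr : q < r) (hr : r < (fniNegs arr).length) :
    (fniNegs arr).getD q 0 < (fniNegs arr).getD r 0 := by
  have := (List.pairwise_iff_getElem.1 (fniNegs_sorted arr)) q r (hqr.trans hr) hr hqr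
  rwa [List.getD_eq_getElem _ _ (hqr.trans hr), List.getD_eq_getElem _ _ hr]

-- specification of the pointer advance
theorem fniAdv_spec_aux (negs : List Nat) (s : Nat) :
    ∀ fuel p, negs.length - p ≤ fuel → p ≤ negs.length → (∀ q, q < p → negs.getD q 0 < s) →
      p ≤ fniAdv negs s p ∧ fniAdv negs s p ≤ negs.length ∧
      (∀ q, q < fniAdv negs s p → negs.getD q 0 < s) ∧
      (fniAdv negs s p < negs.length → s ≤ negs.getD (fniAdv negs s p) 0) := by
  intro fuel
  induction fuel with
  | zero =>
      intro p hf hp hpre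
      have hpe : p = negs.length := by omega
      rw [fniAdv, dif_neg (by omega)]
      exact ⟨le_refl _, hp, hpre, fun h' => absurd h' (by omega)⟩
  | succ fuel ih =>
      intro p hf hp hpre
      rw [fniAdv]
      by_cases h : p < negs.length
      · rw [dif_pos h]
        by_cases hlt : negs.getD p 0 < s
        · rw [if_pos hlt]
          have := ih (p+1) (by omega) (by omega) (by
            intro q hq
            rcases Nat.lt_succ_iff_lt_or_eq.1 hq with h' | h'
            · exact hpre q h'
            · subst h'; exact hlt)
          exact ⟨Nat.le_of_succ_le this.1, this.2.1, this.2.2.1, this.2.2.2⟩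
        · rw [if_neg hlt]
          exact ⟨le_refl _, hp, hpre, fun _ => Nat.le_of_not_lt hlt⟩
      · rw [dif_neg h]
        exact ⟨le_refl _, hp, hpre, fun h' => absurd h' h⟩

theorem fniAdv_spec (negs : List Nat) (s p : Nat) (hp : p ≤ negs.length)
    (hpre : ∀ q, q < p → negs.getD q 0 < s) :
      p ≤ fniAdv negs s p ∧ fniAdv negs s p ≤ negs.length ∧
      (∀ q, q < fniAdv negs s p → negs.getD q 0 < s) ∧
      (fniAdv negs s p < negs.length → s ≤ negs.getD (fniAdv negs s p) 0) :=
  fniAdv_spec_aux negs s (negs.length - p) p (le_refl _) hp hpre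

theorem fniAdv_fixed (negs : List Nat) (s p : Nat)
    (h : p < negs.length → s ≤ negs.getD p 0) : fniAdv negs s p = p := by
  rw [fniAdv]
  by_cases hp : p < negs.length
  · rw [dif_pos hp, if_neg (Nat.not_lt.2 (h hp))]
  · rw [dif_neg hp]

-- unfolding facts for fniWinval
theorem fniWinval_zero (arr : List Int) (s : Nat) : fniWinval arr 0 s = 0 := by
  simp [fniWinval]

theorem fniWinval_oob (arr : List Int) (kn s : Nat) (h : arr.length ≤ s) :
    fniWinval arr kn s = 0 := by
  simp [fniWinval, List.drop_eq_nil_of_le h]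

theorem fniDrop_cons (arr : List Int) (s : Nat) (h : s < arr.length) :
    arr.drop s = arr.getD s 0 :: arr.drop (s+1) := by
  rw [List.getD_eq_getElem _ _ h]
  exact List.drop_eq_getElem_cons h

theorem fniWinval_neg (arr : List Int) (kn s : Nat) (h : s < arr.length)
    (hneg : arr.getD s 0 < 0) : fniWinval arr (kn+1) s = arr.getD s 0 := by
  rw [fniWinval, fniDrop_cons arr s h, List.take_succ_cons, List.filter_cons,
    decide_eq_true hneg, if_pos rfl]
  rfl

theorem fniWinval_nonneg (arr : List Int) (kn s : Nat) (h : s < arr.length)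
    (hneg : ¬ arr.getD s 0 < 0) : fniWinval arr (kn+1) s = fniWinval arr kn (s+1) := by
  rw [fniWinval, fniWinval, fniDrop_cons arr s h, List.take_succ_cons, List.filter_cons,
    decide_eq_false hneg, if_neg (by simp)]

-- the bridging lemma: the pointer computes the window value
theorem fniPointer (arr : List Int) :
    ∀ kn s p, p ≤ (fniNegs arr).length → (∀ q, q < p → (fniNegs arr).getD q 0 < s) →
      fniWinval arr kn s =
        (if fniAdv (fniNegs arr) s p < (fniNegs arr).length ∧
            (fniNegs arr).getD (fniAdv (fniNegs arr) s p) 0 < s + kn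
         then arr.getD ((fniNegs arr).getD (fniAdv (fniNegs arr) s p) 0) 0 else 0) := by
  intro kn
  induction kn with
  | zero =>
      intro s p hp hpre
      obtain ⟨-, -, -, hpost⟩ := fniAdv_spec (fniNegs arr) s p hp hpre
      rw [fniWinval_zero, if_neg]
      rintro ⟨h1, h2⟩
      have := hpost h1
      omega
  | succ kn ih =>
      intro s p hp hpre
      obtain ⟨-, hle, hlt, hpost⟩ := fniAdv_spec (fniNegs arr) s p hp hpre
      set p' := fniAdv (fniNegs arr) s p with hp'
      by_cases hs : s < arr.length
      · by_cases hneg : arr.getD s 0 < 0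
        · -- s itself is a negative position; the pointer lands exactly on it
          have hmem : s ∈ (fniNegs arr) := (fniNegs_mem arr s).2 ⟨hs, hneg⟩
          obtain ⟨q, hqlen, hqs⟩ := List.mem_iff_getElem.1 hmem
          have hqD : (fniNegs arr).getD q 0 = s := by rw [List.getD_eq_getElem _ _ hqlen, hqs]
          have hq_ge : p' ≤ q := by
            by_contra h
            exact absurd hqD (by have := hlt q (Nat.lt_of_not_le h); omega)
          have hp'len : p' < (fniNegs arr).length := lt_of_le_of_lt hq_ge hqlen
          have hval : (fniNegs arr).getD p' 0 = s := by
            rcases Nat.lt_or_ge p' q with h | h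
            · have := fniNegs_mono arr p' q h hqlen
              have := hpost hp'len
              omega
            · have : p' = q := le_antisymm hq_ge h
              rw [this, hqD]
          rw [fniWinval_neg arr kn s hs hneg, if_pos ⟨hp'len, by omega⟩, hval]
        · -- s is not negative: step to window s+1 with the same pointer
          have hnotmem : s ∉ (fniNegs arr) := fun h => hneg ((fniNegs_mem arr s).1 h).2
          have hfix : fniAdv (fniNegs arr) (s+1) p' = p' := by
            apply fniAdv_fixed
            intro h'
            have h1 := hpost h'
            have h2 : (fniNegs arr).getD p' 0 ≠ s := by
              intro he
              apply hnotmem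
              rw [← he, List.getD_eq_getElem _ _ h']
              exact List.getElem_mem h'
            omega
          have := ih (s+1) p' hle (fun q hq => by have := hlt q hq; omega)
          rw [fniWinval_nonneg arr kn s hs hneg, this, hfix]
          have harith : s + 1 + kn = s + (kn + 1) := by omega
          rw [harith]
      · -- window starts past the end: both sides are 0
        rw [fniWinval_oob arr (kn+1) s (Nat.le_of_not_lt hs), if_neg]
        rintro ⟨h1, -⟩
        have := fniNegs_getD_lt arr p' h1
        have := hpost h1
        omega

-- the outer loop of B produces the window values from s on
theorem fniGo_eq (arr : List Int) (kn : Nat) :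
    ∀ cnt s p res, p ≤ (fniNegs arr).length → (∀ q, q < p → (fniNegs arr).getD q 0 < s) →
      fniGo arr (fniNegs arr) kn cnt s p res
        = res ++ (List.range' s cnt).map (fniWinval arr kn) := by
  intro cnt
  induction cnt with
  | zero => intro s p res _ _; simp [fniGo]
  | succ cnt ih =>
      intro s p res hp hpre
      obtain ⟨-, hle, hlt, hpost⟩ := fniAdv_spec (fniNegs arr) s p hp hpre
      rw [fniGo]
      have hv := fniPointer arr kn s p hp hpre
      rw [ih (s+1) (fniAdv (fniNegs arr) s p) _ hle (fun q hq => by have := hlt q hq; omega)]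
      rw [List.range'_succ, List.map_cons, ← hv]
      simp [fniWinval]

-- A's loop: for k ≤ 0 the window-completion branch never fires
theorem fniGoA_nonpos (arr : List Int) (k : Int) (hk : k ≤ 0) :
    ∀ cnt j i lst neg, arr.length - j ≤ cnt → i ≤ j →
      firstNegativeIntegerGo arr k i j lst neg = neg := by
  intro cnt
  induction cnt with
  | zero =>
      intro j i lst neg hc _
      rw [firstNegativeIntegerGo, dif_neg (by omega)]
  | succ cnt ih =>
      intro j i lst neg hc hij
      rw [firstNegativeIntegerGo]
      by_cases hj : j < arr.length
      · rw [dif_pos hj, if_neg (by omega)]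
        exact ih (j+1) i _ _ (by omega) (by omega)
      · rw [dif_neg hj]

-- the take-one-more decomposition of the current window contents
theorem fniTake_succ (arr : List Int) (i j : Nat) (hij : i ≤ j) (hj : j < arr.length) :
    (arr.drop i).take (j + 1 - i) = (arr.drop i).take (j - i) ++ [arr.getD j 0] := by
  have h1 : j + 1 - i = (j - i) + 1 := by omega
  rw [h1, List.take_add_one]
  congr 1
  have h2 : (arr.drop i)[j - i]? = some (arr.getD j 0) := by
    rw [List.getElem?_drop]
    have h3 : i + (j - i) = j := by omega
    rw [h3, List.getElem?_eq_getElem hj, List.getD_eq_getElem _ _ hj]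
  rw [h2]
  rfl

-- A's loop invariant: lst holds the negatives of arr[i:j], result = remaining windows
theorem fniGoA_eq (arr : List Int) (k : Int) (kn : Nat) (hk : k = (kn : Int)) (hkn : 1 ≤ kn) :
    ∀ cnt j i lst neg, arr.length - j ≤ cnt → j ≤ arr.length → i = j + 1 - kn →
      lst = ((arr.drop i).take (j - i)).filter (fun x => decide (x < 0)) →
      firstNegativeIntegerGo arr k i j lst neg
        = neg ++ (List.range' i (arr.length + 1 - kn - i)).map (fniWinval arr kn) := by
  intro cnt
  induction cnt with
  | zero =>
      intro j i lst neg hc hj hi hlst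
      have hje : j = arr.length := by omega
      rw [firstNegativeIntegerGo, dif_neg (by omega)]
      have : arr.length + 1 - kn - i = 0 := by omega
      simp [this]
  | succ cnt ih =>
      intro j i lst neg hc hj hi hlst
      by_cases hjlt : j < arr.length
      · rw [firstNegativeIntegerGo, dif_pos hjlt]
        have hij : i ≤ j := by omega
        have hlst1 :
            (if arr.getD j 0 < 0 then lst ++ [arr.getD j 0] else lst)
              = ((arr.drop i).take (j + 1 - i)).filter (fun x => decide (x < 0)) := by
          rw [fniTake_succ arr i j hij hjlt, List.filter_append, hlst]
          by_cases hnj : arr.getD j 0 < 0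
          · rw [if_pos hnj, List.filter_cons, decide_eq_true hnj, if_pos rfl]
            rfl
          · rw [if_neg hnj, List.filter_cons, decide_eq_false hnj, if_neg (by simp),
              List.filter_nil, List.append_nil]
        by_cases hfire : kn ≤ j + 1
        · -- the window [i, j] is complete
          have hie : i = j + 1 - kn := hi
          have hcond : ((j : Int) - (i : Int) + 1 = k) := by
            rw [hk]; omega
          rw [if_pos hcond]
          have hwlen : j + 1 - i = kn := by omega
          have hiwin : i < arr.length := by omega
          -- decompose the full window at its left end
          have hsplit :
              ((arr.drop i).take (j + 1 - i)).filter (fun x => decide (x < 0))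
                = (if arr.getD i 0 < 0 then [arr.getD i 0] else [])
                    ++ ((arr.drop (i+1)).take (j - i)).filter (fun x => decide (x < 0)) := by
            rw [fniDrop_cons arr i hiwin]
            have h4 : j + 1 - i = (j - i) + 1 := by omega
            rw [h4, List.take_succ_cons, List.filter_cons]
            by_cases hni : arr.getD i 0 < 0
            · rw [if_pos hni, decide_eq_true hni, if_pos rfl, List.singleton_append]
            · rw [if_neg hni, decide_eq_false hni, if_neg (by simp), List.nil_append]
          have hwv : fniWinval arr kn i
              = (((arr.drop i).take (j + 1 - i)).filter (fun x => decide (x < 0))).headD 0 := by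
            rw [fniWinval, hwlen]
          have hrange : arr.length + 1 - kn - i = (arr.length + 1 - kn - (i+1)) + 1 := by omega
          set lst2 := ((arr.drop (i+1)).take (j - i)).filter (fun x => decide (x < 0)) with hlst2
          have harg : j + 1 - (i + 1) = j - i := by omega
          by_cases hni : arr.getD i 0 < 0
          · -- leaving element is the first negative: it is emitted and popped
            have hform : (if arr.getD j 0 < 0 then lst ++ [arr.getD j 0] else lst)
                = arr.getD i 0 :: lst2 := by
              rw [hlst1, hsplit, if_pos hni, List.singleton_append]
            have hval : fniWinval arr kn i = arr.getD i 0 := by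
              rw [hwv, hsplit, if_pos hni, List.singleton_append]
              rfl
            simp only [hform]
            rw [if_pos trivial,
              ih (j+1) (i+1) lst2 (neg ++ [arr.getD i 0]) (by omega) (by omega) (by omega)
                (by rw [harg, ← hlst2]),
              hrange, List.range'_succ, List.map_cons, hval]
            simp
          · -- leaving element is non-negative: nothing to pop
            have hform : (if arr.getD j 0 < 0 then lst ++ [arr.getD j 0] else lst) = lst2 := by
              rw [hlst1, hsplit, if_neg hni, List.nil_append]
            have hval : fniWinval arr kn i = lst2.headD 0 := by
              rw [hwv, hsplit, if_neg hni, List.nil_append]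
            cases hl2 : lst2 with
            | nil =>
                simp only [hform, hl2]
                rw [ih (j+1) (i+1) [] (neg ++ [0]) (by omega) (by omega) (by omega)
                    (by rw [harg, ← hlst2, hl2]),
                  hrange, List.range'_succ, List.map_cons,
                  show fniWinval arr kn i = 0 by rw [hval, hl2]; rfl]
                simp
            | cons x rest =>
                have hxneg : x < 0 := by
                  have hx : x ∈ lst2 := by rw [hl2]; exact List.mem_cons_self
                  rw [hlst2] at hx
                  exact of_decide_eq_true (List.mem_filter.1 hx).2
                simp only [hform, hl2]
                rw [if_neg (by omega),
                  ih (j+1) (i+1) (x :: rest) (neg ++ [x]) (by omega) (by omega) (by omega)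
                    (by rw [harg, ← hlst2, hl2]),
                  hrange, List.range'_succ, List.map_cons,
                  show fniWinval arr kn i = x by rw [hval, hl2]; rfl]
                simp
        · -- window not yet full
          have hcond : ¬ ((j : Int) - (i : Int) + 1 = k) := by rw [hk]; omega
          rw [if_neg hcond]
          have hi0 : i = 0 := by omega
          rw [hlst1]
          exact ih (j+1) i _ neg (by omega) (by omega) (by omega) rfl
      · rw [firstNegativeIntegerGo, dif_neg hjlt]
        have : arr.length + 1 - kn - i = 0 := by omega
        simp [this]

-- ===== VERDICT (by name: the statement is the Claim_ definition above) =====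
theorem firstNegativeInteger_spec : Claim_equal_firstNegativeInteger := by
  intro arr k _
  unfold Spec_firstNegativeInteger firstNegativeInteger firstNegativeInteger_alt
  by_cases hk : k < 1
  · rw [if_pos (Or.inl hk)]
    exact fniGoA_nonpos arr k (by omega) arr.length 0 0 [] [] (by omega) (le_refl 0)
  · have hk1 : 1 ≤ k := by omega
    have hkn : k = ((k.toNat : Nat) : Int) := (Int.toNat_of_nonneg (by omega)).symm
    have h1kn : 1 ≤ k.toNat := by omega
    have hA := fniGoA_eq arr k k.toNat hkn h1kn arr.length 0 0 [] []
      (by omega) (by omega) (by omega) (by simp)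
    rw [hA]
    by_cases hbig : (arr.length : Int) < k
    · rw [if_pos (Or.inr hbig)]
      have : arr.length + 1 - k.toNat - 0 = 0 := by omega
      simp [this]
    · rw [if_neg (by push Not; exact ⟨by omega, by omega⟩)]
      have hB := fniGo_eq arr k.toNat (arr.length + 1 - k.toNat) 0 0 []
        (by omega) (by omega)
      rw [show fniNegs arr = (List.range arr.length).filter (fun m => decide (arr.getD m 0 < 0)) from rfl] at hB
      rw [hB]
      simp
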